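-- pv_equiv track=rewrite | github.com/AstridDahl/AiB2024 | assignment1.py | cost_optimal
-- ===== SOURCE A (Python) =====
-- def empty_matrix(r, c):
--     m = []
--     for i in range(r):
--         m.append([])
--         for j in range(c):
--             m[i].append(None)
--     return m
--
-- def prepare_matrix(r, c, g):
--     pm = empty_matrix(r, c)
--     for i in range(c):
--         pm[0][i] = i*g
--     for i in range(1, r):
--         pm[i][0] = i*g
--     return pm
--
-- def fill_matrix(seq1, seq2, scores, g):
--     r = len(seq1)+1
--     c = len(seq2)+1
--     fm = prepare_matrix(r, c, g)
--     for i in range(1, r): # row index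
--         for j in range(1, c): # col index
--             dscore = fm[i-1][j-1] + scores[seq1[i-1]][seq2[j-1]]
--             lscore = fm[i][j-1] + g
--             uscore = fm[i-1][j] + g
--             fm[i][j] = max(dscore, lscore, uscore)
--     return fm
--
-- def get_traceback_arrow(matrix, row, col, match_score, g):
--     score_diagonal = matrix[row-1][col-1]
--     score_left = matrix[row][col-1]
--     score_upper = matrix[row-1][col]
--
--     score_current = matrix[row][col]
--     if score_current == score_diagonal + match_score:
--         return 'diagonal'
--     if score_current == score_left + g:
--         return 'left'
--     if score_current == score_upper + g:
--         return 'up'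
--
-- def trace_back(seq1, seq2, matrix, score_matrix, g):
--     aligned1 = ''
--     aligned2 = ''
--
--     row = len(seq1)
--     col = len(seq2)
--
--     while row and col > 0:
--         base1 = seq1[row-1]
--         base2 = seq2[col-1]
--
--         match_score = score_matrix[base1][base2]
--
--         traceback_arrow = get_traceback_arrow(matrix, row, col, match_score, g)
--
--         if traceback_arrow == 'diagonal':
--             aligned1 = base1 + aligned1
--             aligned2 = base2 + aligned2
--             row -= 1
--             col -= 1
--
--         elif traceback_arrow == 'up':
--             aligned1 = base1 + aligned1
--             aligned2 = '-' + aligned2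
--             row -= 1
--
--         elif traceback_arrow == 'left':
--             aligned1 = '-' + aligned1
--             aligned2 = base2 + aligned2
--             col -= 1
--
--     while row > 0:
--         base1 = seq1[row-1]
--         aligned1 = base1 + aligned1
--         aligned2 = '-' + aligned2
--         row -= 1
--
--     while col > 0:
--         base2 = seq2[col-1]
--         aligned1 = '-' + aligned1
--         aligned2 = base2 + aligned2
--         col -= 1
--
--     return [aligned1, aligned2]
--
-- def align(seq1, seq2, scores, g):
--     m = fill_matrix(seq1, seq2, scores, g)
--     lst = trace_back(seq1, seq2, m, scores, g)
--     return lst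
--
-- def cost_optimal(seq1, seq2, scores, g):
--     align1, align2 = align(seq1, seq2, scores, g)
--     cost = 0
--     for i in range(len(align1)):
--         if align1[i] == '-' or align2[i] == '-':
--             cost += g
--         else:
--             cost += scores[align1[i]][align2[i]]
--     return cost
-- ===== SOURCE B (Python) =====
-- def cost_optimal(seq1, seq2, scores, g):
--     # Same Needleman-Wunsch recurrence, but rolling single-row DP; returns
--     # the bottom-right cell directly (no full matrix, no traceback, no re-summation).
--     m = len(seq2)
--     prev = [j * g for j in range(m + 1)]
--     for i, a in enumerate(seq1, 1):
--         left = i * g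
--         cur = [left]
--         for j, b in enumerate(seq2, 1):
--             left = max(prev[j - 1] + scores[a][b], left + g, prev[j] + g)
--             cur.append(left)
--         prev = cur
--     return prev[m]
-- ===== Notes on version B (the rewrite author's own statement) =====
-- stated objective: simpler
-- what changed: B keeps the Needleman-Wunsch recurrence but uses a rolling single-row DP and returns the bottom-right cell directly, dropping A's full matrix, traceback string reconstruction and cost re-summation passes.
-- outside the precondition, e.g. on cost_optimal('-', 'a', {'-': {'a': 5}}, 0): A returns 0, B returns 5
import Mathlib
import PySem

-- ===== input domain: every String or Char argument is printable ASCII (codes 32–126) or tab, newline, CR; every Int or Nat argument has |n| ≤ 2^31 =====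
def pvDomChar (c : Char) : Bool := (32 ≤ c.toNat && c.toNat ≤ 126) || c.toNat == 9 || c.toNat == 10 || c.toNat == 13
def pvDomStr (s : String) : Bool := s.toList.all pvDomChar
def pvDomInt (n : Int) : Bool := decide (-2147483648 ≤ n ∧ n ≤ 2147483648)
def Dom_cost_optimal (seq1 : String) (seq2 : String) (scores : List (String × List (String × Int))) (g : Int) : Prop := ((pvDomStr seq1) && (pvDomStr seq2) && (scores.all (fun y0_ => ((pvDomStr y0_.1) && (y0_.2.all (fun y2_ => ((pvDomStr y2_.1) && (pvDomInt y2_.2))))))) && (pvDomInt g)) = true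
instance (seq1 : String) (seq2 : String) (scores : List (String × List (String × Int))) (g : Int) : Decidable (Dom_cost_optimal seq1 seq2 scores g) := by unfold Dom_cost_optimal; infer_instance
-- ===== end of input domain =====

-- B replaces A's full-matrix fill + traceback + cost re-summation by a rolling single-row DP that
-- returns the bottom-right Needleman-Wunsch cell directly (simpler; return value only).

-- ===== PORT A =====
-- Python scores[a][b] (nested dict lookup); the KeyError cases (missing key) are excluded by Pre_,
-- so the default 0 is never the claimed value.
def scoreLookup (scores : List (String × List (String × Int))) (a b : String) : Int :=
  PySem.Dict.getD (PySem.Dict.mk (PySem.Dict.getD (PySem.Dict.mk scores) a [])) b 0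

-- The Python matrix (list of lists) is represented as an index function Nat → Nat → Int; every
-- read/write A performs is in range, so the representation is value-faithful, and the `None`
-- placeholder is 0 (never read before being written).
def matSet (m : Nat → Nat → Int) (i j : Nat) (v : Int) : Nat → Nat → Int :=
  fun i' j' => if i' = i ∧ j' = j then v else m i' j'

def emptyMatrixA : Nat → Nat → Int := fun _ _ => 0

def prepareMatrixA (r c : Nat) (g : Int) : Nat → Nat → Int :=
  let pm := emptyMatrixA
  let pm := (List.range c).foldl (fun pm i => matSet pm 0 i ((i : Int) * g)) pm
  (List.range' 1 (r - 1)).foldl (fun pm i => matSet pm i 0 ((i : Int) * g)) pm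

def fillMatrixA (seq1 seq2 : List Char) (scores : List (String × List (String × Int))) (g : Int) :
    Nat → Nat → Int :=
  let r := seq1.length + 1
  let c := seq2.length + 1
  let fm := prepareMatrixA r c g
  (List.range' 1 (r - 1)).foldl (fun fm i =>
    (List.range' 1 (c - 1)).foldl (fun fm j =>
      let dscore := fm (i - 1) (j - 1) +
        scoreLookup scores (String.ofList [seq1.getD (i - 1) ' ']) (String.ofList [seq2.getD (j - 1) ' '])
      let lscore := fm i (j - 1) + g
      let uscore := fm (i - 1) j + g
      matSet fm i j (max (max dscore lscore) uscore)) fm) fm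

def getTracebackArrowA (matrix : Nat → Nat → Int) (row col : Nat) (matchScore g : Int) :
    Option String :=
  let scoreDiagonal := matrix (row - 1) (col - 1)
  let scoreLeft := matrix row (col - 1)
  let scoreUpper := matrix (row - 1) col
  let scoreCurrent := matrix row col
  if scoreCurrent = scoreDiagonal + matchScore then some "diagonal"
  else if scoreCurrent = scoreLeft + g then some "left"
  else if scoreCurrent = scoreUpper + g then some "up"
  else none

-- the `while row and col > 0` loop; fuel = row + col bounds the iterations (each productive
-- step decreases row + col, and an arrow is always found since the cell is the max of the three)
def tbLoopA (seq1 seq2 : List Char) (matrix : Nat → Nat → Int)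
    (scores : List (String × List (String × Int))) (g : Int) :
    Nat → Nat → Nat → List Char → List Char → Nat × Nat × List Char × List Char
  | 0, row, col, a1, a2 => (row, col, a1, a2)
  | fuel + 1, row, col, a1, a2 =>
    if row ≠ 0 ∧ 0 < col then
      let base1 := seq1.getD (row - 1) ' '
      let base2 := seq2.getD (col - 1) ' '
      let ms := scoreLookup scores (String.ofList [base1]) (String.ofList [base2])
      let ta := getTracebackArrowA matrix row col ms g
      if ta = some "diagonal" then
        tbLoopA seq1 seq2 matrix scores g fuel (row - 1) (col - 1) (base1 :: a1) (base2 :: a2)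
      else if ta = some "up" then
        tbLoopA seq1 seq2 matrix scores g fuel (row - 1) col (base1 :: a1) ('-' :: a2)
      else if ta = some "left" then
        tbLoopA seq1 seq2 matrix scores g fuel row (col - 1) ('-' :: a1) (base2 :: a2)
      else
        tbLoopA seq1 seq2 matrix scores g fuel row col a1 a2
    else (row, col, a1, a2)

-- `while row > 0` trailing loop
def finishRowsA (seq1 : List Char) : Nat → List Char → List Char → List Char × List Char
  | 0, a1, a2 => (a1, a2)
  | row + 1, a1, a2 => finishRowsA seq1 row (seq1.getD row ' ' :: a1) ('-' :: a2)

-- `while col > 0` trailing loop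
def finishColsA (seq2 : List Char) : Nat → List Char → List Char → List Char × List Char
  | 0, a1, a2 => (a1, a2)
  | col + 1, a1, a2 => finishColsA seq2 col ('-' :: a1) (seq2.getD col ' ' :: a2)

def traceBackA (seq1 seq2 : List Char) (matrix : Nat → Nat → Int)
    (scores : List (String × List (String × Int))) (g : Int) : List Char × List Char :=
  let row := seq1.length
  let col := seq2.length
  let s := tbLoopA seq1 seq2 matrix scores g (row + col) row col [] []
  let t := finishRowsA seq1 s.1 s.2.2.1 s.2.2.2
  finishColsA seq2 s.2.1 t.1 t.2

-- `for i in range(len(align1)): cost += …`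
def costLoopA (a1 a2 : List Char) (scores : List (String × List (String × Int))) (g : Int)
    (i : Nat) (cost : Int) : Int :=
  if i < a1.length then
    costLoopA a1 a2 scores g (i + 1)
      (if a1.getD i ' ' = '-' ∨ a2.getD i ' ' = '-' then cost + g
       else cost + scoreLookup scores (String.ofList [a1.getD i ' ']) (String.ofList [a2.getD i ' ']))
  else cost
termination_by a1.length - i

def cost_optimal (seq1 : String) (seq2 : String) (scores : List (String × List (String × Int))) (g : Int) : Int :=
  let m := fillMatrixA seq1.toList seq2.toList scores g
  let lst := traceBackA seq1.toList seq2.toList m scores g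
  costLoopA lst.1 lst.2 scores g 0 0

-- ===== PORT B =====
-- inner loop of Source B: the cells j = 1 .. len(seq2) of the new row, walking prev (prev[j-1],
-- prev[j]) and carrying `left` (= cur[j-1])
def altRowB (scores : List (String × List (String × Int))) (g : Int) (a : Char) :
    List Char → List Int → Int → List Int
  | [], _, _ => []
  | b :: bs, p0 :: p1 :: ps, left =>
    let v := max (max (p0 + scoreLookup scores (String.ofList [a]) (String.ofList [b])) (left + g)) (p1 + g)
    v :: altRowB scores g a bs (p1 :: ps) v
  | _ :: _, _, _ => []   -- unreachable: prev always has length len(seq2)+1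

-- outer loop of Source B over seq1 with 1-based index i
def altRowsB (scores : List (String × List (String × Int))) (g : Int) (seq2 : List Char) :
    List Char → Nat → List Int → List Int
  | [], _, prev => prev
  | a :: rest, i, prev =>
    altRowsB scores g seq2 rest (i + 1) (((i : Int) * g) :: altRowB scores g a seq2 prev ((i : Int) * g))

def cost_optimal_alt (seq1 : String) (seq2 : String) (scores : List (String × List (String × Int))) (g : Int) : Int :=
  let m := seq2.toList.length
  let prev := (List.range (m + 1)).map (fun (j : Nat) => (j : Int) * g)
  (altRowsB scores g seq2.toList seq1.toList 1 prev).getD m 0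

-- ===== PRECONDITION & SPEC =====
-- Pre_ excludes (a) inputs where a scores[·][·] lookup is missing, on which A raises KeyError, and
-- (b) sequences containing the gap symbol '-' itself — outside the alignment task's natural domain —
-- on which A's re-summation accidentally re-prices a '-' character aligned diagonally as a gap.
def Pre_cost_optimal (seq1 : String) (seq2 : String) (scores : List (String × List (String × Int))) (g : Int) : Prop :=
  ((seq1.toList.all fun c => decide (c ≠ '-') &&
      (seq2.toList.all fun d =>
        (PySem.Dict.get? (PySem.Dict.mk scores) (String.ofList [c])).isSome &&
        (PySem.Dict.get? (PySem.Dict.mk (PySem.Dict.getD (PySem.Dict.mk scores)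
          (String.ofList [c]) [])) (String.ofList [d])).isSome)) &&
    (seq2.toList.all fun d => decide (d ≠ '-'))) = true
instance (seq1 : String) (seq2 : String) (scores : List (String × List (String × Int))) (g : Int) : Decidable (Pre_cost_optimal seq1 seq2 scores g) := by unfold Pre_cost_optimal; infer_instance

def pvWitness_cost_optimal : String × String × (List (String × List (String × Int))) × Int :=
  ("a", "b", [("a", [("b", 1)])], -2)

def Spec_cost_optimal (seq1 : String) (seq2 : String) (scores : List (String × List (String × Int))) (g : Int) (out : Int) : Prop := out = cost_optimal_alt seq1 seq2 scores g
instance (seq1 : String) (seq2 : String) (scores : List (String × List (String × Int))) (g : Int) (out : Int) : Decidable (Spec_cost_optimal seq1 seq2 scores g out) := by unfold Spec_cost_optimal; infer_instance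

-- ===== CLAIM (what is proved, stated in full; the proofs are below) =====
def Claim_equal_cost_optimal : Prop := ∀ (seq1 : String) (seq2 : String) (scores : List (String × List (String × Int))) (g : Int), Dom_cost_optimal seq1 seq2 scores g → Pre_cost_optimal seq1 seq2 scores g → Spec_cost_optimal seq1 seq2 scores g (cost_optimal seq1 seq2 scores g)

-- ===== LEMMAS AND PROOFS =====

-- the Needleman-Wunsch cell value both programs compute
def cellF (s1 s2 : List Char) (scores : List (String × List (String × Int))) (g : Int) :
    Nat → Nat → Int
  | 0, j => (j : Int) * g
  | i + 1, 0 => ((i + 1 : Nat) : Int) * g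
  | i + 1, j + 1 =>
    max (max (cellF s1 s2 scores g i j +
          scoreLookup scores (String.ofList [s1.getD i ' ']) (String.ofList [s2.getD j ' ']))
        (cellF s1 s2 scores g (i + 1) j + g))
      (cellF s1 s2 scores g i (j + 1) + g)
termination_by i j => (i, j)

lemma cellF_row0 (s1 s2 : List Char) (scores : List (String × List (String × Int))) (g : Int)
    (j : Nat) : cellF s1 s2 scores g 0 j = (j : Int) * g := by
  simp [cellF]

lemma cellF_col0 (s1 s2 : List Char) (scores : List (String × List (String × Int))) (g : Int)
    (i : Nat) : cellF s1 s2 scores g i 0 = (i : Int) * g := by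
  cases i <;> simp [cellF]

lemma cellF_succ (s1 s2 : List Char) (scores : List (String × List (String × Int))) (g : Int)
    (i j : Nat) :
    cellF s1 s2 scores g (i + 1) (j + 1) =
    max (max (cellF s1 s2 scores g i j +
          scoreLookup scores (String.ofList [s1.getD i ' ']) (String.ofList [s2.getD j ' ']))
        (cellF s1 s2 scores g (i + 1) j + g))
      (cellF s1 s2 scores g i (j + 1) + g) := by
  simp [cellF]

-- re-summation value of an alignment (proof-side mirror of A's cost loop)
def resum (scores : List (String × List (String × Int))) (g : Int) :
    List Char → List Char → Int
  | x :: xs, y :: ys =>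
    (if x = '-' ∨ y = '-' then g
     else scoreLookup scores (String.ofList [x]) (String.ofList [y])) + resum scores g xs ys
  | _, _ => 0

lemma costLoopA_eq_resum (scores : List (String × List (String × Int))) (g : Int)
    (a1 a2 : List Char) (hlen : a1.length = a2.length) :
    ∀ (i : Nat) (cost : Int),
      costLoopA a1 a2 scores g i cost = cost + resum scores g (a1.drop i) (a2.drop i) := by
  intro i cost
  fun_induction costLoopA a1 a2 scores g i cost with
  | case1 i cost h ih =>
    have h2 : i < a2.length := hlen ▸ h
    rw [List.drop_eq_getElem_cons h, List.drop_eq_getElem_cons h2]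
    simp only [resum]
    rw [List.getD_eq_getElem a1 ' ' h, List.getD_eq_getElem a2 ' ' h2] at ih ⊢
    split_ifs at ih ⊢ with hif
    · rw [ih]; ring
    · rw [ih]; ring
  | case2 i cost h =>
    rw [List.drop_eq_nil_of_le (by omega), List.drop_eq_nil_of_le (by omega)]
    simp [resum]

lemma finishColsA_spec (s2 : List Char) (scores : List (String × List (String × Int))) (g : Int) :
    ∀ (col : Nat) (a1 a2 : List Char),
      (finishColsA s2 col a1 a2).1.length = col + a1.length ∧
      (finishColsA s2 col a1 a2).2.length = col + a2.length ∧
      resum scores g (finishColsA s2 col a1 a2).1 (finishColsA s2 col a1 a2).2 =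
        (col : Int) * g + resum scores g a1 a2 := by
  intro col
  induction col with
  | zero =>
    intro a1 a2
    simp only [finishColsA]
    refine ⟨by omega, by omega, by push_cast; ring⟩
  | succ c ih =>
    intro a1 a2
    obtain ⟨h1, h2, h3⟩ := ih ('-' :: a1) (s2.getD c ' ' :: a2)
    simp only [finishColsA, h1, h2, h3, resum, List.length_cons, true_or, if_true]
    refine ⟨by omega, by omega, ?_⟩
    push_cast
    ring

lemma finishRowsA_spec (s1 : List Char) (scores : List (String × List (String × Int))) (g : Int) :
    ∀ (row : Nat) (a1 a2 : List Char),
      (finishRowsA s1 row a1 a2).1.length = row + a1.length ∧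
      (finishRowsA s1 row a1 a2).2.length = row + a2.length ∧
      resum scores g (finishRowsA s1 row a1 a2).1 (finishRowsA s1 row a1 a2).2 =
        (row : Int) * g + resum scores g a1 a2 := by
  intro row
  induction row with
  | zero =>
    intro a1 a2
    simp only [finishRowsA]
    refine ⟨by omega, by omega, by push_cast; ring⟩
  | succ r ih =>
    intro a1 a2
    obtain ⟨h1, h2, h3⟩ := ih (s1.getD r ' ' :: a1) ('-' :: a2)
    simp only [finishRowsA, h1, h2, h3, resum, List.length_cons, or_true, if_true]
    refine ⟨by omega, by omega, ?_⟩
    push_cast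
    ring

-- prepare_matrix: the first loop writes row 0, the second column 0
lemma foldl_row0_spec (g : Int) :
    ∀ (c : Nat) (pm : Nat → Nat → Int) (i' j' : Nat),
      ((List.range c).foldl (fun pm i => matSet pm 0 i ((i : Int) * g)) pm) i' j' =
        if i' = 0 ∧ j' < c then (j' : Int) * g else pm i' j' := by
  intro c
  induction c with
  | zero => intro pm i' j'; simp
  | succ c ih =>
    intro pm i' j'
    rw [List.range_succ, List.foldl_append, List.foldl_cons, List.foldl_nil]
    show matSet ((List.range c).foldl (fun pm i => matSet pm 0 i ((i : Int) * g)) pm) 0 c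
        ((c : Int) * g) i' j' = _
    have hms : matSet ((List.range c).foldl (fun pm i => matSet pm 0 i ((i : Int) * g)) pm) 0 c
        ((c : Int) * g) i' j' =
        if i' = 0 ∧ j' = c then (c : Int) * g
        else ((List.range c).foldl (fun pm i => matSet pm 0 i ((i : Int) * g)) pm) i' j' := rfl
    rw [hms, ih]
    by_cases h1 : i' = 0 ∧ j' = c
    · obtain ⟨rfl, rfl⟩ := h1
      rw [if_pos ⟨rfl, rfl⟩, if_pos ⟨rfl, by omega⟩]
    · rw [if_neg h1]
      by_cases h2 : i' = 0 ∧ j' < c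
      · rw [if_pos h2, if_pos ⟨h2.1, by omega⟩]
      · have h3 : ¬ (i' = 0 ∧ j' < c + 1) := by
          rintro ⟨rfl, hlt⟩
          rcases Nat.lt_succ_iff_lt_or_eq.mp hlt with h | h
          · exact h2 ⟨rfl, h⟩
          · exact h1 ⟨rfl, h⟩
        rw [if_neg h2, if_neg h3]

lemma foldl_col0_spec (g : Int) :
    ∀ (k : Nat) (pm : Nat → Nat → Int) (i' j' : Nat),
      ((List.range' 1 k).foldl (fun pm i => matSet pm i 0 ((i : Int) * g)) pm) i' j' =
        if 1 ≤ i' ∧ i' ≤ k ∧ j' = 0 then (i' : Int) * g else pm i' j' := by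
  intro k
  induction k with
  | zero => intro pm i' j'; simp; omega
  | succ k ih =>
    intro pm i' j'
    rw [List.range'_concat, List.foldl_append, List.foldl_cons, List.foldl_nil]
    rw [show 1 + 1 * k = k + 1 from by omega]
    show matSet ((List.range' 1 k).foldl (fun pm i => matSet pm i 0 ((i : Int) * g)) pm) (k + 1) 0
        (((k + 1 : Nat) : Int) * g) i' j' = _
    have hms : matSet ((List.range' 1 k).foldl (fun pm i => matSet pm i 0 ((i : Int) * g)) pm)
        (k + 1) 0 (((k + 1 : Nat) : Int) * g) i' j' =
        if i' = k + 1 ∧ j' = 0 then ((k + 1 : Nat) : Int) * g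
        else ((List.range' 1 k).foldl (fun pm i => matSet pm i 0 ((i : Int) * g)) pm) i' j' := rfl
    rw [hms, ih]
    by_cases h1 : i' = k + 1 ∧ j' = 0
    · obtain ⟨rfl, rfl⟩ := h1
      rw [if_pos ⟨rfl, rfl⟩, if_pos ⟨by omega, by omega, rfl⟩]
    · rw [if_neg h1]
      by_cases h2 : 1 ≤ i' ∧ i' ≤ k ∧ j' = 0
      · rw [if_pos h2, if_pos ⟨h2.1, by omega, h2.2.2⟩]
      · have h3 : ¬ (1 ≤ i' ∧ i' ≤ k + 1 ∧ j' = 0) := by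
          rintro ⟨ha, hb, rfl⟩
          rcases Nat.lt_succ_iff_lt_or_eq.mp (Nat.lt_succ_of_le hb) with h | h
          · exact h2 ⟨ha, by omega, rfl⟩
          · exact h1 ⟨by omega, rfl⟩
        rw [if_neg h2, if_neg h3]

lemma prepareMatrixA_spec (s1 s2 : List Char) (scores : List (String × List (String × Int)))
    (g : Int) :
    (∀ j, j ≤ s2.length → prepareMatrixA (s1.length + 1) (s2.length + 1) g 0 j = cellF s1 s2 scores g 0 j) ∧
    (∀ i, i ≤ s1.length → prepareMatrixA (s1.length + 1) (s2.length + 1) g i 0 = cellF s1 s2 scores g i 0) := by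
  constructor
  · intro j hj
    show ((List.range' 1 ((s1.length + 1) - 1)).foldl (fun pm i => matSet pm i 0 ((i : Int) * g))
        ((List.range (s2.length + 1)).foldl (fun pm i => matSet pm 0 i ((i : Int) * g))
          emptyMatrixA)) 0 j = _
    rw [foldl_col0_spec, foldl_row0_spec, cellF_row0]
    rw [if_neg (by omega), if_pos ⟨rfl, by omega⟩]
  · intro i hi
    show ((List.range' 1 ((s1.length + 1) - 1)).foldl (fun pm i => matSet pm i 0 ((i : Int) * g))
        ((List.range (s2.length + 1)).foldl (fun pm i => matSet pm 0 i ((i : Int) * g))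
          emptyMatrixA)) i 0 = _
    rw [foldl_col0_spec, cellF_col0, Nat.add_sub_cancel]
    by_cases h1 : 1 ≤ i
    · rw [if_pos ⟨h1, hi, rfl⟩]
    · have hi0 : i = 0 := by omega
      subst hi0
      rw [if_neg (by omega), foldl_row0_spec, if_pos ⟨rfl, by omega⟩]

-- the two nested fill loops, as named step functions (definitionally the lambdas in fillMatrixA)
def innerStep (s1 s2 : List Char) (scores : List (String × List (String × Int))) (g : Int)
    (i : Nat) : (Nat → Nat → Int) → Nat → (Nat → Nat → Int) :=
  fun fm j =>
    matSet fm i j (max (max (fm (i - 1) (j - 1) +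
        scoreLookup scores (String.ofList [s1.getD (i - 1) ' ']) (String.ofList [s2.getD (j - 1) ' ']))
      (fm i (j - 1) + g)) (fm (i - 1) j + g))

lemma fillMatrixA_eq (s1 s2 : List Char) (scores : List (String × List (String × Int))) (g : Int) :
    fillMatrixA s1 s2 scores g =
      (List.range' 1 s1.length).foldl
        (fun fm i => (List.range' 1 s2.length).foldl (innerStep s1 s2 scores g i) fm)
        (prepareMatrixA (s1.length + 1) (s2.length + 1) g) := by
  show (List.range' 1 ((s1.length + 1) - 1)).foldl
      (fun fm i => (List.range' 1 ((s2.length + 1) - 1)).foldl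
        (fun fm j => innerStep s1 s2 scores g i fm j) fm)
      (prepareMatrixA (s1.length + 1) (s2.length + 1) g) = _
  simp only [Nat.add_sub_cancel]

lemma fill_inner_spec (s1 s2 : List Char) (scores : List (String × List (String × Int))) (g : Int)
    (i : Nat) (hi1 : 1 ≤ i) :
    ∀ (jl : Nat) (fm : Nat → Nat → Int), jl ≤ s2.length →
      (∀ j' ≤ s2.length, fm (i - 1) j' = cellF s1 s2 scores g (i - 1) j') →
      fm i 0 = cellF s1 s2 scores g i 0 →
      (∀ i' j', (i' ≠ i ∨ j' = 0 ∨ jl < j') →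
        ((List.range' 1 jl).foldl (innerStep s1 s2 scores g i) fm) i' j' = fm i' j') ∧
      (∀ j', 1 ≤ j' → j' ≤ jl →
        ((List.range' 1 jl).foldl (innerStep s1 s2 scores g i) fm) i j' = cellF s1 s2 scores g i j') := by
  intro jl
  induction jl with
  | zero =>
    intro fm _ _ _
    simp only [List.range'_zero, List.foldl_nil]
    exact ⟨fun _ _ _ => by trivial, fun j' h1 h2 => by omega⟩
  | succ jl ih =>
    intro fm hjl hprev hcur0
    obtain ⟨ihp, ihc⟩ := ih fm (by omega) hprev hcur0
    rw [List.range'_concat, List.foldl_append, List.foldl_cons, List.foldl_nil]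
    rw [show 1 + 1 * jl = jl + 1 from by omega]
    set F := (List.range' 1 jl).foldl (innerStep s1 s2 scores g i) fm with hF
    have hd : F (i - 1) jl = cellF s1 s2 scores g (i - 1) jl := by
      rw [ihp (i - 1) jl (Or.inl (by omega))]
      exact hprev jl (by omega)
    have hu : F (i - 1) (jl + 1) = cellF s1 s2 scores g (i - 1) (jl + 1) := by
      rw [ihp (i - 1) (jl + 1) (Or.inl (by omega))]
      exact hprev (jl + 1) (by omega)
    have hl : F i jl = cellF s1 s2 scores g i jl := by
      rcases Nat.eq_zero_or_pos jl with h0 | h0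
      · subst h0; rw [ihp i 0 (Or.inr (Or.inl rfl))]; exact hcur0
      · exact ihc jl h0 le_rfl
    obtain ⟨k, rfl⟩ : ∃ k, i = k + 1 := ⟨i - 1, by omega⟩
    have hstep : innerStep s1 s2 scores g (k + 1) F (jl + 1) =
        matSet F (k + 1) (jl + 1) (cellF s1 s2 scores g (k + 1) (jl + 1)) := by
      show matSet F (k + 1) (jl + 1) (max (max (F (k + 1 - 1) (jl + 1 - 1) +
          scoreLookup scores (String.ofList [s1.getD (k + 1 - 1) ' '])
            (String.ofList [s2.getD (jl + 1 - 1) ' ']))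
        (F (k + 1) (jl + 1 - 1) + g)) (F (k + 1 - 1) (jl + 1) + g)) = _
      rw [show k + 1 - 1 = k from rfl, show jl + 1 - 1 = jl from rfl]
      rw [show (k + 1 - 1 : Nat) = k from rfl] at hd hu
      rw [hd, hl, hu, ← cellF_succ]
    rw [hstep]
    constructor
    · intro i' j' hcase
      show (if i' = k + 1 ∧ j' = jl + 1 then _ else F i' j') = fm i' j'
      rw [if_neg (by omega)]
      exact ihp i' j' (by omega)
    · intro j' h1 h2
      show (if (k + 1) = k + 1 ∧ j' = jl + 1 then cellF s1 s2 scores g (k + 1) (jl + 1)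
        else F (k + 1) j') = _
      by_cases hj : j' = jl + 1
      · subst hj; rw [if_pos ⟨rfl, rfl⟩]
      · rw [if_neg (by omega)]
        exact ihc j' h1 (by omega)

lemma fill_outer_spec (s1 s2 : List Char) (scores : List (String × List (String × Int))) (g : Int) :
    ∀ (il : Nat) (fm : Nat → Nat → Int), il ≤ s1.length →
      (∀ j' ≤ s2.length, fm 0 j' = cellF s1 s2 scores g 0 j') →
      (∀ i' ≤ s1.length, fm i' 0 = cellF s1 s2 scores g i' 0) →
      (∀ i' j', (il < i' ∨ i' = 0) →
        ((List.range' 1 il).foldl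
          (fun fm i => (List.range' 1 s2.length).foldl (innerStep s1 s2 scores g i) fm) fm) i' j' = fm i' j') ∧
      (∀ i' j', i' ≤ il → j' ≤ s2.length →
        ((List.range' 1 il).foldl
          (fun fm i => (List.range' 1 s2.length).foldl (innerStep s1 s2 scores g i) fm) fm) i' j' =
          cellF s1 s2 scores g i' j') := by
  intro il
  induction il with
  | zero =>
    intro fm _ h0 hc
    simp only [List.range'_zero, List.foldl_nil]
    refine ⟨fun _ _ _ => by trivial, fun i' j' hi hj => ?_⟩
    have hi0 : i' = 0 := by omega
    subst hi0
    exact h0 j' hj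
  | succ il ih =>
    intro fm hil h0 hc
    obtain ⟨ihp, ihc⟩ := ih fm (by omega) h0 hc
    rw [List.range'_concat, List.foldl_append, List.foldl_cons, List.foldl_nil]
    rw [show 1 + 1 * il = il + 1 from by omega]
    set F := (List.range' 1 il).foldl
      (fun fm i => (List.range' 1 s2.length).foldl (innerStep s1 s2 scores g i) fm) fm with hFdef
    have hprevrow : ∀ j' ≤ s2.length, F ((il + 1) - 1) j' = cellF s1 s2 scores g ((il + 1) - 1) j' := by
      intro j' hj'
      rw [show (il + 1) - 1 = il from rfl]
      rcases Nat.eq_zero_or_pos il with h0' | h0'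
      · subst h0'
        rw [ihp 0 j' (Or.inr rfl)]
        exact h0 j' hj'
      · exact ihc il j' le_rfl hj'
    have hcur0 : F (il + 1) 0 = cellF s1 s2 scores g (il + 1) 0 := by
      rw [ihp (il + 1) 0 (Or.inl (by omega))]
      exact hc (il + 1) hil
    obtain ⟨innp, innc⟩ := fill_inner_spec s1 s2 scores g (il + 1) (by omega) s2.length F le_rfl
      hprevrow hcur0
    constructor
    · intro i' j' hcase
      show ((List.range' 1 s2.length).foldl (innerStep s1 s2 scores g (il + 1)) F) i' j' = fm i' j'
      rw [innp i' j' (Or.inl (by omega))]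
      exact ihp i' j' (by omega)
    · intro i' j' hi' hj'
      show ((List.range' 1 s2.length).foldl (innerStep s1 s2 scores g (il + 1)) F) i' j' = _
      by_cases hieq : i' = il + 1
      · subst hieq
        rcases Nat.eq_zero_or_pos j' with hj0 | hj0
        · subst hj0
          rw [innp (il + 1) 0 (Or.inr (Or.inl rfl))]
          exact hcur0
        · exact innc j' hj0 hj'
      · rw [innp i' j' (Or.inl hieq)]
        exact ihc i' j' (by omega) hj'

lemma fillMatrixA_eq_cellF (s1 s2 : List Char) (scores : List (String × List (String × Int)))
    (g : Int) :
    ∀ i ≤ s1.length, ∀ j ≤ s2.length,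
      fillMatrixA s1 s2 scores g i j = cellF s1 s2 scores g i j := by
  intro i hi j hj
  rw [fillMatrixA_eq]
  obtain ⟨hrow, hcol⟩ := prepareMatrixA_spec s1 s2 scores g
  obtain ⟨_, hres⟩ := fill_outer_spec s1 s2 scores g s1.length
    (prepareMatrixA (s1.length + 1) (s2.length + 1) g) le_rfl hrow hcol
  exact hres i j hi hj

-- traceback main loop + trailing loops: the composition A actually evaluates
def tbFull (s1 s2 : List Char) (M : Nat → Nat → Int)
    (scores : List (String × List (String × Int))) (g : Int)
    (fuel row col : Nat) (a1 a2 : List Char) : List Char × List Char :=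
  let s := tbLoopA s1 s2 M scores g fuel row col a1 a2
  let t := finishRowsA s1 s.1 s.2.2.1 s.2.2.2
  finishColsA s2 s.2.1 t.1 t.2

lemma traceBackA_eq_tbFull (s1 s2 : List Char) (M : Nat → Nat → Int)
    (scores : List (String × List (String × Int))) (g : Int) :
    traceBackA s1 s2 M scores g = tbFull s1 s2 M scores g (s1.length + s2.length) s1.length s2.length [] [] := rfl

lemma tbFull_spec (s1 s2 : List Char) (M : Nat → Nat → Int)
    (scores : List (String × List (String × Int))) (g : Int)
    (hM : ∀ i ≤ s1.length, ∀ j ≤ s2.length, M i j = cellF s1 s2 scores g i j)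
    (h1 : ∀ c ∈ s1, c ≠ '-') (h2 : ∀ d ∈ s2, d ≠ '-') :
    ∀ (fuel row col : Nat) (a1 a2 : List Char), row + col ≤ fuel → row ≤ s1.length →
      col ≤ s2.length → a1.length = a2.length →
      (tbFull s1 s2 M scores g fuel row col a1 a2).1.length =
        (tbFull s1 s2 M scores g fuel row col a1 a2).2.length ∧
      resum scores g (tbFull s1 s2 M scores g fuel row col a1 a2).1
          (tbFull s1 s2 M scores g fuel row col a1 a2).2 =
        cellF s1 s2 scores g row col + resum scores g a1 a2 := by
  intro fuel
  induction fuel with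
  | zero =>
    intro row col a1 a2 hf hr hc hlen
    have hr0 : row = 0 := by omega
    have hc0 : col = 0 := by omega
    subst hr0; subst hc0
    have hz : tbFull s1 s2 M scores g 0 0 0 a1 a2 = (a1, a2) := rfl
    rw [hz]
    refine ⟨hlen, ?_⟩
    rw [cellF_row0]
    simp
  | succ fuel ih =>
    intro row col a1 a2 hf hr hc hlen
    by_cases hcond : row ≠ 0 ∧ 0 < col
    · obtain ⟨hrne, hcpos⟩ := hcond
      obtain ⟨r, rfl⟩ : ∃ r, row = r + 1 := ⟨row - 1, by omega⟩
      obtain ⟨c, rfl⟩ : ∃ c, col = c + 1 := ⟨col - 1, by omega⟩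
      have hrn : r < s1.length := by omega
      have hcn : c < s2.length := by omega
      have hb1ne : s1.getD r ' ' ≠ '-' := by
        rw [List.getD_eq_getElem s1 ' ' hrn]; exact h1 _ (List.getElem_mem hrn)
      have hb2ne : s2.getD c ' ' ≠ '-' := by
        rw [List.getD_eq_getElem s2 ' ' hcn]; exact h2 _ (List.getElem_mem hcn)
      have hMd : M r c = cellF s1 s2 scores g r c := hM r (by omega) c (by omega)
      have hMl : M (r + 1) c = cellF s1 s2 scores g (r + 1) c := hM (r + 1) hr c (by omega)
      have hMu : M r (c + 1) = cellF s1 s2 scores g r (c + 1) := hM r (by omega) (c + 1) hc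
      have hMc : M (r + 1) (c + 1) = cellF s1 s2 scores g (r + 1) (c + 1) := hM (r + 1) hr (c + 1) hc
      have hrec := cellF_succ s1 s2 scores g r c
      have hta : getTracebackArrowA M (r + 1) (c + 1)
          (scoreLookup scores (String.ofList [s1.getD r ' ']) (String.ofList [s2.getD c ' '])) g =
          (if cellF s1 s2 scores g (r + 1) (c + 1) = cellF s1 s2 scores g r c +
              scoreLookup scores (String.ofList [s1.getD r ' ']) (String.ofList [s2.getD c ' ']) then some "diagonal"
           else if cellF s1 s2 scores g (r + 1) (c + 1) = cellF s1 s2 scores g (r + 1) c + g then some "left"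
           else if cellF s1 s2 scores g (r + 1) (c + 1) = cellF s1 s2 scores g r (c + 1) + g then some "up"
           else none) := by
        show (if M (r + 1) (c + 1) = M ((r + 1) - 1) ((c + 1) - 1) +
              scoreLookup scores (String.ofList [s1.getD r ' ']) (String.ofList [s2.getD c ' ']) then some "diagonal"
           else if M (r + 1) (c + 1) = M (r + 1) ((c + 1) - 1) + g then some "left"
           else if M (r + 1) (c + 1) = M ((r + 1) - 1) (c + 1) + g then some "up"
           else none) = _
        rw [show ((r + 1) - 1 : Nat) = r from rfl, show ((c + 1) - 1 : Nat) = c from rfl]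
        rw [hMd, hMl, hMu, hMc]
      by_cases hdiag : cellF s1 s2 scores g (r + 1) (c + 1) = cellF s1 s2 scores g r c +
          scoreLookup scores (String.ofList [s1.getD r ' ']) (String.ofList [s2.getD c ' '])
      · have harrow : getTracebackArrowA M (r + 1) (c + 1)
            (scoreLookup scores (String.ofList [s1.getD r ' ']) (String.ofList [s2.getD c ' '])) g =
            some "diagonal" := by rw [hta, if_pos hdiag]
        have hstep : tbFull s1 s2 M scores g (fuel + 1) (r + 1) (c + 1) a1 a2 =
            tbFull s1 s2 M scores g fuel r c (s1.getD r ' ' :: a1) (s2.getD c ' ' :: a2) := by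
          unfold tbFull
          rw [tbLoopA, if_pos ⟨hrne, hcpos⟩]
          simp only [Nat.add_sub_cancel, harrow, Option.some.injEq, String.reduceEq, reduceIte,
            reduceCtorEq]
        rw [hstep]
        obtain ⟨hL, hR⟩ := ih r c (s1.getD r ' ' :: a1) (s2.getD c ' ' :: a2)
          (by omega) (by omega) (by omega) (by simp [hlen])
        refine ⟨hL, ?_⟩
        rw [hR]
        simp only [resum]
        rw [if_neg (by push_neg; exact ⟨hb1ne, hb2ne⟩)]
        rw [hdiag]
        ring
      · by_cases hleft : cellF s1 s2 scores g (r + 1) (c + 1) = cellF s1 s2 scores g (r + 1) c + g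
        · have harrow : getTracebackArrowA M (r + 1) (c + 1)
              (scoreLookup scores (String.ofList [s1.getD r ' ']) (String.ofList [s2.getD c ' '])) g =
              some "left" := by rw [hta, if_neg hdiag, if_pos hleft]
          have hstep : tbFull s1 s2 M scores g (fuel + 1) (r + 1) (c + 1) a1 a2 =
              tbFull s1 s2 M scores g fuel (r + 1) c ('-' :: a1) (s2.getD c ' ' :: a2) := by
            unfold tbFull
            rw [tbLoopA, if_pos ⟨hrne, hcpos⟩]
            simp only [Nat.add_sub_cancel, harrow, Option.some.injEq, String.reduceEq, reduceIte,
              reduceCtorEq]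
          rw [hstep]
          obtain ⟨hL, hR⟩ := ih (r + 1) c ('-' :: a1) (s2.getD c ' ' :: a2)
            (by omega) hr (by omega) (by simp [hlen])
          refine ⟨hL, ?_⟩
          rw [hR]
          simp only [resum, true_or, if_true]
          rw [hleft]
          ring
        · by_cases hup : cellF s1 s2 scores g (r + 1) (c + 1) = cellF s1 s2 scores g r (c + 1) + g
          · have harrow : getTracebackArrowA M (r + 1) (c + 1)
                (scoreLookup scores (String.ofList [s1.getD r ' ']) (String.ofList [s2.getD c ' '])) g =
                some "up" := by rw [hta, if_neg hdiag, if_neg hleft, if_pos hup]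
            have hstep : tbFull s1 s2 M scores g (fuel + 1) (r + 1) (c + 1) a1 a2 =
                tbFull s1 s2 M scores g fuel r (c + 1) (s1.getD r ' ' :: a1) ('-' :: a2) := by
              unfold tbFull
              rw [tbLoopA, if_pos ⟨hrne, hcpos⟩]
              simp only [Nat.add_sub_cancel, harrow, Option.some.injEq, String.reduceEq, reduceIte,
                reduceCtorEq]
            rw [hstep]
            obtain ⟨hL, hR⟩ := ih r (c + 1) (s1.getD r ' ' :: a1) ('-' :: a2)
              (by omega) (by omega) hc (by simp [hlen])
            refine ⟨hL, ?_⟩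
            rw [hR]
            simp only [resum, or_true, if_true]
            rw [hup]
            ring
          · exfalso
            rcases max_choice (max (cellF s1 s2 scores g r c +
                scoreLookup scores (String.ofList [s1.getD r ' ']) (String.ofList [s2.getD c ' ']))
                (cellF s1 s2 scores g (r + 1) c + g))
              (cellF s1 s2 scores g r (c + 1) + g) with hm | hm
            · rcases max_choice (cellF s1 s2 scores g r c +
                  scoreLookup scores (String.ofList [s1.getD r ' ']) (String.ofList [s2.getD c ' ']))
                (cellF s1 s2 scores g (r + 1) c + g) with hm2 | hm2
              · exact hdiag (by rw [hrec, hm, hm2])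
              · exact hleft (by rw [hrec, hm, hm2])
            · exact hup (by rw [hrec, hm])
    · have hstep : tbFull s1 s2 M scores g (fuel + 1) row col a1 a2 =
          finishColsA s2 col ((finishRowsA s1 row a1 a2).1) ((finishRowsA s1 row a1 a2).2) := by
        unfold tbFull
        rw [tbLoopA, if_neg hcond]
      rw [hstep]
      obtain ⟨g1, g2, g3⟩ := finishRowsA_spec s1 scores g row a1 a2
      obtain ⟨k1, k2, k3⟩ := finishColsA_spec s2 scores g col
        (finishRowsA s1 row a1 a2).1 (finishRowsA s1 row a1 a2).2
      refine ⟨by rw [k1, k2, g1, g2, hlen], ?_⟩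
      rw [k3, g3]
      rcases Decidable.not_and_iff_or_not.mp hcond with h | h
      · have hr0 : row = 0 := by omega
        subst hr0
        rw [cellF_row0]
        push_cast
        ring
      · have hc0 : col = 0 := by omega
        subst hc0
        rw [cellF_col0]
        push_cast
        ring

-- B's row recursion produces the next cellF row
lemma altRowB_spec (s1 s2 : List Char) (scores : List (String × List (String × Int))) (g : Int)
    (i : Nat) :
    ∀ (bs : List Char) (j : Nat), bs = s2.drop j → j + bs.length = s2.length →
      altRowB scores g (s1.getD i ' ') bs
        ((List.range' j (bs.length + 1)).map (cellF s1 s2 scores g i))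
        (cellF s1 s2 scores g (i + 1) j) =
      (List.range' (j + 1) bs.length).map (cellF s1 s2 scores g (i + 1)) := by
  intro bs
  induction bs with
  | nil => intro j _ _; simp [altRowB]
  | cons b bs ih =>
    intro j hdrop hlen
    have hj : j < s2.length := by
      have hlc : (b :: bs).length = bs.length + 1 := rfl
      omega
    have hcons : b :: bs = s2[j] :: s2.drop (j + 1) := by
      rw [hdrop]; exact List.drop_eq_getElem_cons hj
    have hb : b = s2.getD j ' ' := by
      rw [List.getD_eq_getElem s2 ' ' hj]; exact (List.cons_eq_cons.mp hcons).1
    have htail : bs = s2.drop (j + 1) := (List.cons_eq_cons.mp hcons).2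
    have hexp : (List.range' j ((b :: bs).length + 1)).map (cellF s1 s2 scores g i) =
        cellF s1 s2 scores g i j :: cellF s1 s2 scores g i (j + 1) ::
          (List.range' (j + 2) bs.length).map (cellF s1 s2 scores g i) := by
      rw [show ((b :: bs).length + 1) = (bs.length + 1) + 1 from rfl]
      rw [List.range'_succ, List.range'_succ, List.map_cons, List.map_cons]
    rw [hexp]
    show (max (max (cellF s1 s2 scores g i j +
          scoreLookup scores (String.ofList [s1.getD i ' ']) (String.ofList [b]))
        (cellF s1 s2 scores g (i + 1) j + g)) (cellF s1 s2 scores g i (j + 1) + g)) ::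
      altRowB scores g (s1.getD i ' ') bs
        (cellF s1 s2 scores g i (j + 1) :: (List.range' (j + 2) bs.length).map (cellF s1 s2 scores g i))
        (max (max (cellF s1 s2 scores g i j +
          scoreLookup scores (String.ofList [s1.getD i ' ']) (String.ofList [b]))
        (cellF s1 s2 scores g (i + 1) j + g)) (cellF s1 s2 scores g i (j + 1) + g)) = _
    have hv : max (max (cellF s1 s2 scores g i j +
          scoreLookup scores (String.ofList [s1.getD i ' ']) (String.ofList [b]))
        (cellF s1 s2 scores g (i + 1) j + g)) (cellF s1 s2 scores g i (j + 1) + g) =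
        cellF s1 s2 scores g (i + 1) (j + 1) := by
      rw [hb, ← cellF_succ]
    rw [hv]
    have hmid : cellF s1 s2 scores g i (j + 1) ::
        (List.range' (j + 2) bs.length).map (cellF s1 s2 scores g i) =
        (List.range' (j + 1) (bs.length + 1)).map (cellF s1 s2 scores g i) := by
      rw [List.range'_succ, List.map_cons]
    rw [hmid, ih (j + 1) htail (by have hlc : (b :: bs).length = bs.length + 1 := rfl; omega)]
    rw [show (b :: bs).length = bs.length + 1 from rfl]
    rw [List.range'_succ, List.map_cons]

lemma altRowsB_spec (s1 s2 : List Char) (scores : List (String × List (String × Int))) (g : Int) :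
    ∀ (rest : List Char) (i : Nat), rest = s1.drop i → i ≤ s1.length →
      altRowsB scores g s2 rest (i + 1)
        ((List.range' 0 (s2.length + 1)).map (cellF s1 s2 scores g i)) =
      (List.range' 0 (s2.length + 1)).map (cellF s1 s2 scores g s1.length) := by
  intro rest
  induction rest with
  | nil =>
    intro i hdrop hle
    have hlc := congrArg List.length hdrop
    simp only [List.length_nil, List.length_drop] at hlc
    have hieq : i = s1.length := by omega
    subst hieq
    simp [altRowsB]
  | cons a rest ih =>
    intro i hdrop hle
    have hlc := congrArg List.length hdrop
    simp only [List.length_cons, List.length_drop] at hlc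
    have hi : i < s1.length := by omega
    have hcons : a :: rest = s1[i] :: s1.drop (i + 1) := by
      rw [hdrop]; exact List.drop_eq_getElem_cons hi
    have ha : a = s1.getD i ' ' := by
      rw [List.getD_eq_getElem s1 ' ' hi]; exact (List.cons_eq_cons.mp hcons).1
    have htail : rest = s1.drop (i + 1) := (List.cons_eq_cons.mp hcons).2
    show altRowsB scores g s2 rest (i + 1 + 1)
        ((((i + 1 : Nat) : Int) * g) :: altRowB scores g a s2
          ((List.range' 0 (s2.length + 1)).map (cellF s1 s2 scores g i)) (((i + 1 : Nat) : Int) * g)) = _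
    have hrow : altRowB scores g a s2
        ((List.range' 0 (s2.length + 1)).map (cellF s1 s2 scores g i))
        (((i + 1 : Nat) : Int) * g) =
        (List.range' 1 s2.length).map (cellF s1 s2 scores g (i + 1)) := by
      have hspec := altRowB_spec s1 s2 scores g i s2 0 rfl (by omega)
      rw [← ha] at hspec
      rw [show (((i + 1 : Nat) : Int) * g) = cellF s1 s2 scores g (i + 1) 0 from
        (cellF_col0 s1 s2 scores g (i + 1)).symm]
      exact hspec
    rw [hrow]
    have hcol : (((i + 1 : Nat) : Int) * g) ::
        (List.range' 1 s2.length).map (cellF s1 s2 scores g (i + 1)) =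
        (List.range' 0 (s2.length + 1)).map (cellF s1 s2 scores g (i + 1)) := by
      rw [List.range'_succ, List.map_cons, cellF_col0]
    rw [hcol]
    exact ih (i + 1) htail (by omega)

lemma cost_optimal_alt_eq_cellF (seq1 seq2 : String)
    (scores : List (String × List (String × Int))) (g : Int) :
    cost_optimal_alt seq1 seq2 scores g =
      cellF seq1.toList seq2.toList scores g seq1.toList.length seq2.toList.length := by
  show (altRowsB scores g seq2.toList seq1.toList 1
      ((List.range (seq2.toList.length + 1)).map (fun (j : Nat) => (j : Int) * g))).getD
      seq2.toList.length 0 = _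
  have hinit : (List.range (seq2.toList.length + 1)).map (fun (j : Nat) => (j : Int) * g) =
      (List.range' 0 (seq2.toList.length + 1)).map (cellF seq1.toList seq2.toList scores g 0) := by
    rw [List.range_eq_range']
    exact List.map_congr_left (fun j _ => (cellF_row0 seq1.toList seq2.toList scores g j).symm)
  rw [hinit]
  rw [show (1 : Nat) = 0 + 1 from rfl]
  rw [altRowsB_spec seq1.toList seq2.toList scores g seq1.toList 0 rfl (by omega)]
  have hlt : seq2.toList.length <
      ((List.range' 0 (seq2.toList.length + 1)).map
        (cellF seq1.toList seq2.toList scores g seq1.toList.length)).length := by simp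
  rw [List.getD_eq_getElem _ 0 hlt, List.getElem_map]
  congr 1
  have hge := List.getElem_range'_1 (n := 0) (m := seq2.toList.length + 1) seq2.toList.length
    (by simp)
  simpa using hge

-- ===== VERDICT (by name: the statement is the Claim_ definition above) =====
theorem cost_optimal_spec : Claim_equal_cost_optimal := by
  unfold Claim_equal_cost_optimal
  intro seq1 seq2 scores g _hdom hpre
  unfold Spec_cost_optimal
  unfold Pre_cost_optimal at hpre
  simp only [Bool.and_eq_true, List.all_eq_true, decide_eq_true_eq] at hpre
  obtain ⟨hp1, hp2⟩ := hpre
  have h1 : ∀ c ∈ seq1.toList, c ≠ '-' := fun c hc => (hp1 c hc).1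
  show costLoopA
      (traceBackA seq1.toList seq2.toList (fillMatrixA seq1.toList seq2.toList scores g) scores g).1
      (traceBackA seq1.toList seq2.toList (fillMatrixA seq1.toList seq2.toList scores g) scores g).2
      scores g 0 0 = cost_optimal_alt seq1 seq2 scores g
  rw [traceBackA_eq_tbFull]
  obtain ⟨hL, hR⟩ := tbFull_spec seq1.toList seq2.toList
    (fillMatrixA seq1.toList seq2.toList scores g) scores g
    (fillMatrixA_eq_cellF seq1.toList seq2.toList scores g) h1 hp2
    (seq1.toList.length + seq2.toList.length) seq1.toList.length seq2.toList.length [] []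
    le_rfl le_rfl le_rfl rfl
  rw [costLoopA_eq_resum scores g _ _ hL 0 0]
  simp only [List.drop_zero]
  rw [hR, cost_optimal_alt_eq_cellF]
  simp [resum]
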